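-- pv_equiv track=rewrite | github.com/zyscal/PycharmProjects | pythonProject/BC26_20211108_REG_RTT_TCP/20211108_REG_TCP_RTT.py | split_datetime_by_change
-- ===== SOURCE A (Python) =====
-- def split_datetime_by_change(datetime_change, datetime_list) :
--     datetime_lists = []
--     datetime_list_iter = 0
--     for i in datetime_change :
--         tem_datetime_lists = []
--         while datetime_list_iter < len(datetime_list) and datetime_list[datetime_list_iter] <= i :
--             tem_datetime_lists.append(datetime_list[datetime_list_iter])
--             datetime_list_iter += 1
--         datetime_lists.append(tem_datetime_lists)
--     return datetime_lists
-- ===== SOURCE B (Python) =====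
-- def split_datetime_by_change(datetime_change, datetime_list):
--     # one pass over datetime_list, advancing a boundary cursor (loops inverted vs A)
--     n = len(datetime_change)
--     if n == 0:
--         return []
--     out = []
--     cur = []
--     t = 0
--     for x in datetime_list:
--         while t < n and datetime_change[t] < x:
--             out.append(cur)
--             cur = []
--             t += 1
--         if t == n:
--             break
--         cur.append(x)
--     if t < n:
--         out.append(cur)
--         out.extend([] for _ in range(n - t - 1))
--     return out
-- ===== Notes on version B (the rewrite author's own statement) =====
-- stated objective: alternative
-- what changed: B inverts the loop nesting: instead of iterating over the boundaries and consuming list elements with an inner while (A), B makes one pass over datetime_list, advancing a boundary cursor with an inner while that closes finished buckets, then pads trailing empty buckets.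
import Mathlib
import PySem

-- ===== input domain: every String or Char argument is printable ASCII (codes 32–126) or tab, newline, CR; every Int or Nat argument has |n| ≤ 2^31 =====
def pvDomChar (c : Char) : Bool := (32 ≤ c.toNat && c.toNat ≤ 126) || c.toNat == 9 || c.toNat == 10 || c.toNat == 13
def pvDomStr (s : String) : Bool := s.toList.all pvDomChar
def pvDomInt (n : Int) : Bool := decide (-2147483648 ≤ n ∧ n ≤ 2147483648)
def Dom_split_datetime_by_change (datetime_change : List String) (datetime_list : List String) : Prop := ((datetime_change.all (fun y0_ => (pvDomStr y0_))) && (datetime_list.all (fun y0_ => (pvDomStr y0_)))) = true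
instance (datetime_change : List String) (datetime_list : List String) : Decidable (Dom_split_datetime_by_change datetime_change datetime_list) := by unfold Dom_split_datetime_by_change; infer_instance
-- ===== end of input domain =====

-- B inverts A's loop nesting (one pass over datetime_list with a boundary cursor); same asymptotic cost.

-- ===== PORT A =====
-- the inner 'while datetime_list_iter < len(...) and datetime_list[iter] <= i' loop
def pvATake (datetime_list : List String) (i : String) (iter : Nat) : List String × Nat :=
  if h : iter < datetime_list.length then
    if datetime_list[iter] ≤ i then
      let r := pvATake datetime_list i (iter + 1)
      (datetime_list[iter] :: r.1, r.2)
    else ([], iter)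
  else ([], iter)
termination_by datetime_list.length - iter

-- the outer 'for i in datetime_change' loop, carrying datetime_list_iter
def pvAGo (datetime_change : List String) (datetime_list : List String) (iter : Nat) : List (List String) :=
  match datetime_change with
  | [] => []
  | i :: rest =>
    let p := pvATake datetime_list i iter
    p.1 :: pvAGo rest datetime_list p.2

def split_datetime_by_change (datetime_change : List String) (datetime_list : List String) : List (List String) :=
  pvAGo datetime_change datetime_list 0

-- ===== PORT B =====
-- B's inner 'while t < n and datetime_change[t] < x' loop: close buckets until x fits
def pvBAdv (dc : List String) (x : String) (t : Nat) (out : List (List String)) (cur : List String) :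
    List (List String) × List String × Nat :=
  if h : t < dc.length then
    if dc[t] < x then pvBAdv dc x (t + 1) (out ++ [cur]) []
    else (out, cur, t)
  else (out, cur, t)
termination_by dc.length - t

-- B's 'for x in datetime_list' loop; the [] case is the post-loop padding
def pvBGo (dc : List String) (data : List String) (t : Nat) (out : List (List String)) (cur : List String) :
    List (List String) :=
  match data with
  | [] => if t < dc.length then out ++ [cur] ++ List.replicate (dc.length - t - 1) [] else out
  | x :: xs =>
    let r := pvBAdv dc x t out cur
    if r.2.2 = dc.length then r.1
    else pvBGo dc xs r.2.2 r.1 (r.2.1 ++ [x])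

def split_datetime_by_change_alt (datetime_change : List String) (datetime_list : List String) : List (List String) :=
  if datetime_change.length = 0 then []
  else pvBGo datetime_change datetime_list 0 [] []

-- ===== PRECONDITION & SPEC =====
def Spec_split_datetime_by_change (datetime_change : List String) (datetime_list : List String) (out : List (List String)) : Prop := out = split_datetime_by_change_alt datetime_change datetime_list
instance (datetime_change : List String) (datetime_list : List String) (out : List (List String)) : Decidable (Spec_split_datetime_by_change datetime_change datetime_list out) := by unfold Spec_split_datetime_by_change; infer_instance

-- ===== CLAIM (what is proved, stated in full; the proofs are below) =====
def Claim_equal_split_datetime_by_change : Prop := ∀ (datetime_change : List String) (datetime_list : List String), Dom_split_datetime_by_change datetime_change datetime_list → Spec_split_datetime_by_change datetime_change datetime_list (split_datetime_by_change datetime_change datetime_list)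

-- ===== LEMMAS AND PROOFS =====

-- common characterisation: bucket k is the takeWhile of what is left at boundary k
def pvMSpec : List String → List String → List (List String)
  | [], _ => []
  | b :: bs, data => data.takeWhile (fun y => decide (y ≤ b)) :: pvMSpec bs (data.dropWhile (fun y => decide (y ≤ b)))

def pvModHead (cur : List String) : List (List String) → List (List String)
  | [] => []
  | h :: tl => (cur ++ h) :: tl

theorem pvDrop_takeWhile_length (l : List String) (p : String → Bool) :
    l.drop (l.takeWhile p).length = l.dropWhile p := by
  induction l with
  | nil => simp
  | cons a t ih => by_cases h : p a <;> simp [h, ih]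

theorem pvATake_eq (datetime_list : List String) (i : String) (iter : Nat) :
    pvATake datetime_list i iter =
      ((datetime_list.drop iter).takeWhile (fun y => decide (y ≤ i)),
       iter + ((datetime_list.drop iter).takeWhile (fun y => decide (y ≤ i))).length) := by
  fun_induction pvATake datetime_list i iter with
  | case1 iter h hle r ih =>
      rw [List.drop_eq_getElem_cons h]
      simp only [List.takeWhile_cons, decide_eq_true hle, r, ih]
      simp
      omega
  | case2 iter h hle =>
      rw [List.drop_eq_getElem_cons h]
      simp only [List.takeWhile_cons, decide_eq_false hle]
      simp
  | case3 iter h =>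
      rw [List.drop_eq_nil_of_le (by omega)]
      simp

theorem pvAGo_eq (datetime_change datetime_list : List String) (iter : Nat) :
    pvAGo datetime_change datetime_list iter = pvMSpec datetime_change (datetime_list.drop iter) := by
  induction datetime_change generalizing iter with
  | nil => rfl
  | cons b rest ih =>
      rw [pvAGo, pvMSpec]
      simp only [pvATake_eq]
      rw [ih, ← List.drop_drop, pvDrop_takeWhile_length]

theorem pvModHead_nil_cons (cur : List String) (L : List (List String)) :
    [cur] ++ pvModHead [] L = cur :: L := by
  cases L <;> simp [pvModHead]

theorem pvMSpec_drop_step (dc : List String) (x : String) (t : Nat) (h : t < dc.length)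
    (hlt : dc[t] < x) (xs : List String) :
    pvMSpec (dc.drop t) (x :: xs) = [] :: pvMSpec (dc.drop (t + 1)) (x :: xs) := by
  have hle : ¬ x ≤ dc[t] := not_le.mpr hlt
  rw [List.drop_eq_getElem_cons h, pvMSpec,
      List.takeWhile_cons_of_neg (by simp [hle]), List.dropWhile_cons_of_neg (by simp [hle])]

theorem pvMSpec_nil_data (bs : List String) : pvMSpec bs [] = List.replicate bs.length [] := by
  induction bs with
  | nil => rfl
  | cons b t ih => simp [pvMSpec, List.replicate_succ, ih]

theorem pvBAdv_eq (dc : List String) (x : String) (t : Nat) (out : List (List String)) (cur : List String) :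
    t ≤ dc.length →
    (pvBAdv dc x t out cur).2.2 ≤ dc.length ∧
    (∀ h : (pvBAdv dc x t out cur).2.2 < dc.length, x ≤ dc[(pvBAdv dc x t out cur).2.2]'h) ∧
    (∀ xs : List String,
      (pvBAdv dc x t out cur).1 ++
          pvModHead (pvBAdv dc x t out cur).2.1 (pvMSpec (dc.drop (pvBAdv dc x t out cur).2.2) (x :: xs)) =
        out ++ pvModHead cur (pvMSpec (dc.drop t) (x :: xs))) := by
  fun_induction pvBAdv dc x t out cur with
  | case1 t out cur h hlt ih =>
      intro _
      have ih' := ih (by omega)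
      refine ⟨ih'.1, ih'.2.1, fun xs => ?_⟩
      rw [ih'.2.2 xs, pvMSpec_drop_step dc x t h hlt xs, List.append_assoc, pvModHead_nil_cons]
      simp [pvModHead]
  | case2 t out cur h hlt =>
      exact fun _ => ⟨le_of_lt h, fun _ => not_lt.mp hlt, fun xs => rfl⟩
  | case3 t out cur h =>
      exact fun ht => ⟨ht, fun hh => absurd hh h, fun xs => rfl⟩

theorem pvBGo_eq (dc : List String) (data : List String) (t : Nat) (out : List (List String)) (cur : List String) (htl : t ≤ dc.length) :
    pvBGo dc data t out cur = out ++ pvModHead cur (pvMSpec (dc.drop t) data) := by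
  induction data generalizing t out cur with
  | nil =>
      rw [pvBGo]
      by_cases h : t < dc.length
      · rw [if_pos h, pvMSpec_nil_data, List.length_drop]
        have : dc.length - t = (dc.length - t - 1) + 1 := by omega
        rw [this, List.replicate_succ]
        simp [pvModHead]
      · rw [if_neg h, List.drop_eq_nil_of_le (by omega)]
        simp [pvMSpec, pvModHead]
  | cons x xs ih =>
      rw [pvBGo]
      obtain ⟨h1, h2, h3⟩ := pvBAdv_eq dc x t out cur htl
      by_cases he : (pvBAdv dc x t out cur).2.2 = dc.length
      · rw [if_pos he]
        have := h3 xs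
        rw [he, List.drop_length] at this
        simpa [pvMSpec, pvModHead] using this
      · rw [if_neg he]
        have ht : (pvBAdv dc x t out cur).2.2 < dc.length := by omega
        rw [ih _ _ _ (le_of_lt ht), ← h3 xs]
        rw [List.drop_eq_getElem_cons ht]
        rw [pvMSpec, pvMSpec]
        simp only [List.takeWhile_cons, List.dropWhile_cons, decide_eq_true (h2 ht)]
        simp [pvModHead]

theorem pvAlt_eq (dc dl : List String) : split_datetime_by_change_alt dc dl = pvMSpec dc dl := by
  rw [split_datetime_by_change_alt]
  by_cases h : dc.length = 0
  · rw [if_pos h, List.length_eq_zero_iff.mp h]; rfl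
  · have hne : dc ≠ [] := by intro hnil; subst hnil; simp at h
    obtain ⟨b, bs, rfl⟩ := List.exists_cons_of_ne_nil hne
    rw [if_neg h, pvBGo_eq _ _ _ _ _ (Nat.zero_le _), List.drop_zero]
    simp [pvMSpec, pvModHead]

-- ===== VERDICT (by name: the statement is the Claim_ definition above) =====
theorem split_datetime_by_change_spec : Claim_equal_split_datetime_by_change := by
  intro dc dl _
  show _ = _
  rw [split_datetime_by_change, pvAGo_eq, pvAlt_eq, List.drop_zero]
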